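-- pv_equiv track=rewrite | github.com/JoonHyeok-hozy-Kim/datastructure_and_algorithm_in_python | Contents/Part13_Text_Processing/part13_06_exercises.py | prefix_suffix_compare
-- ===== SOURCE A (Python) =====
-- def prefix_suffix_compare(X):
--     prefix = []
--     walk = len(X)-1
--     while walk > 0:
--         temp_text = []
--         for i in range(len(X)-walk):
--             if X[i] != X[walk+i]:
--                 break
--             else:
--                 temp_text.append(X[i])
--             if i == len(X)-walk-1:
--                 prefix.append(''.join(temp_text))
--         walk -= 1
--     return prefix
-- ===== SOURCE B (Python) =====
-- def prefix_suffix_compare(X):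
--     # Border-chain algorithm: every proper border of X is either the longest
--     # proper border b or a border of X[:b]; follow that chain and reverse.
--     def longest_border(s):
--         for l in range(len(s) - 1, 0, -1):
--             if s[:l] == s[len(s) - l:]:
--                 return l
--         return 0
--
--     out = []
--     b = longest_border(X)
--     while b > 0:
--         out.append(X[:b])
--         b = longest_border(X[:b])
--     out.reverse()
--     return out
-- ===== Notes on version B (the rewrite author's own statement) =====
-- stated objective: faster
-- what changed: B replaces A's scan over all n-1 suffix alignments with per-character comparison and list-append/join by the border-chain algorithm: find the longest proper border once by a descending scan of slice comparisons, then follow borders-of-borders (every proper border of X is a border of its longest proper border), building the list back-to-front and reversing.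
import Mathlib
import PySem

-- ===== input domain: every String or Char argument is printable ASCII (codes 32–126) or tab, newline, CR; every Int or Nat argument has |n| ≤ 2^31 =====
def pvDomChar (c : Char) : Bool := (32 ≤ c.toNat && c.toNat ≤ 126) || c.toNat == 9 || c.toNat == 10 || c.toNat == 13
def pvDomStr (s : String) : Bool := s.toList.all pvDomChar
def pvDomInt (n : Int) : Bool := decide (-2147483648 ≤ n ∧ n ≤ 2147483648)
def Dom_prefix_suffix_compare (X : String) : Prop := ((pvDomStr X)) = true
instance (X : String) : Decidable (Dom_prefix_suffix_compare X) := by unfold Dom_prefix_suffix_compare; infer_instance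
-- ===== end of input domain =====

-- B finds the longest proper border and follows the border-of-border chain instead of
-- A's scan over all suffix alignments; measurably faster (bulk slice comparisons, no
-- per-character append/join work).

-- ===== PORT A =====
-- inner 'for i in range(len(X)-walk)' with break; every index accessed is in range
-- (i < len-walk, walk+i < len), so getD with a dummy default is exact here.
def pscLoopA (cs : List Char) (walk : Nat) (temp : List Char) (acc : List String) :
    List Nat → List String
  | [] => acc
  | i :: rest =>
    if cs.getD i ' ' ≠ cs.getD (walk + i) ' ' then acc  -- break
    else
      let temp' := temp ++ [cs.getD i ' ']              -- temp_text.append(X[i])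
      let acc' := if i = cs.length - walk - 1 then acc ++ [String.ofList temp'] else acc
      pscLoopA cs walk temp' acc' rest

-- 'while walk > 0: … ; walk -= 1'
def pscOuterA (cs : List Char) (acc : List String) : Nat → List String
  | 0 => acc
  | w + 1 => pscOuterA cs (pscLoopA cs (w + 1) [] acc (List.range (cs.length - (w + 1)))) w

def prefix_suffix_compare (X : String) : List String :=
  pscOuterA X.toList [] (X.toList.length - 1)

-- ===== PORT B =====
-- 'for l in range(len(s)-1, 0, -1): if s[:l] == s[len(s)-l:]: return l' ; 'return 0'
-- (Python slices with 0 ≤ l ≤ len(s) are exactly take/drop)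
def lbGo (cs : List Char) : Nat → Nat
  | 0 => 0
  | l + 1 => if cs.take (l + 1) == cs.drop (cs.length - (l + 1)) then l + 1 else lbGo cs l

def longestBorder (cs : List Char) : Nat := lbGo cs (cs.length - 1)

-- needed by pscChainB's termination argument
theorem lbGo_le (cs : List Char) (k : Nat) : lbGo cs k ≤ k := by
  induction k with
  | zero => simp [lbGo]
  | succ l ih => simp only [lbGo]; split <;> omega

-- 'while b > 0: out.append(X[:b]); b = longest_border(X[:b])'
def pscChainB (cs : List Char) (b : Nat) (out : List String) : List String :=
  if b = 0 then out
  else pscChainB cs (longestBorder (cs.take b)) (out ++ [String.ofList (cs.take b)])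
termination_by b
decreasing_by
  have h1 : lbGo (cs.take b) ((cs.take b).length - 1) ≤ (cs.take b).length - 1 :=
    lbGo_le _ _
  have h2 : (cs.take b).length ≤ b := by simp [List.length_take]
  simp only [longestBorder]; omega

-- 'out.reverse(); return out'
def prefix_suffix_compare_alt (X : String) : List String :=
  (pscChainB X.toList (longestBorder X.toList) []).reverse

-- ===== PRECONDITION & SPEC =====
def Spec_prefix_suffix_compare (X : String) (out : List String) : Prop := out = prefix_suffix_compare_alt X
instance (X : String) (out : List String) : Decidable (Spec_prefix_suffix_compare X out) := by unfold Spec_prefix_suffix_compare; infer_instance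

-- ===== CLAIM (what is proved, stated in full; the proofs are below) =====
def Claim_equal_prefix_suffix_compare : Prop := ∀ (X : String), Dom_prefix_suffix_compare X → Spec_prefix_suffix_compare X (prefix_suffix_compare X)

-- ===== LEMMAS AND PROOFS =====

-- a border of length k: prefix of length k equals suffix of length k
def borderB (cs : List Char) (k : Nat) : Bool :=
  cs.take k == cs.drop (cs.length - k)

def fOut (cs : List Char) (k : Nat) : String := String.ofList (cs.take k)

-- all border lengths in 1..m, increasing, rendered as strings
def gOut (cs : List Char) (m : Nat) : List String :=
  ((List.range' 1 m).filter (fun k => borderB cs k)).map (fOut cs)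

theorem getD_lt (cs : List Char) (i : Nat) (h : i < cs.length) : cs.getD i ' ' = cs[i] := by
  simp [List.getD_eq_getElem?_getD, List.getElem?_eq_getElem h]

theorem borderB_iff (cs : List Char) (walk : Nat) (h1 : 1 ≤ walk) (h2 : walk ≤ cs.length) :
    borderB cs (cs.length - walk) = true ↔
      ∀ i < cs.length - walk, cs.getD i ' ' = cs.getD (walk + i) ' ' := by
  unfold borderB
  rw [beq_iff_eq]
  have hlen : cs.length - (cs.length - walk) = walk := by omega
  rw [hlen]
  constructor
  · intro h i hi
    have h1' : (cs.take (cs.length - walk))[i]'(by simp; omega) =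
        (cs.drop walk)[i]'(by simp; omega) := by
      simp only [h]
    rw [List.getElem_take, List.getElem_drop] at h1'
    rw [getD_lt cs i (by omega), getD_lt cs (walk + i) (by omega)]
    exact h1'
  · intro h
    apply List.ext_getElem
    · simp only [List.length_take, List.length_drop]; omega
    · intro i hi1 hi2
      have hi : i < cs.length - walk := by simpa using hi1
      have := h i hi
      rw [getD_lt cs i (by omega), getD_lt cs (walk + i) (by omega)] at this
      rw [List.getElem_take, List.getElem_drop]
      exact this

theorem take_eq_map_range (cs : List Char) (m : Nat) (hm : m ≤ cs.length) :
    (List.range m).map (fun i => cs.getD i ' ') = cs.take m := by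
  apply List.ext_getElem
  · simp only [List.length_map, List.length_range, List.length_take]; omega
  · intro i hi1 hi2
    have hi : i < m := by simpa using hi1
    rw [List.getElem_map, List.getElem_take, List.getElem_range,
      getD_lt cs i (by omega)]

-- inner loop: processes range' (m-r) r, temp holds what matched so far
theorem pscLoopA_spec (cs : List Char) (walk : Nat) (hw1 : 1 ≤ walk) (hw2 : walk ≤ cs.length - 1) :
    ∀ r, 1 ≤ r → r ≤ cs.length - walk → ∀ temp acc,
      pscLoopA cs walk temp acc (List.range' (cs.length - walk - r) r) =
        if (List.range' (cs.length - walk - r) r).all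
             (fun i => cs.getD i ' ' == cs.getD (walk + i) ' ')
        then acc ++ [String.ofList (temp ++ (List.range' (cs.length - walk - r) r).map
               (fun i => cs.getD i ' '))]
        else acc := by
  intro r
  induction r with
  | zero => omega
  | succ r ih =>
    intro _ hr temp acc
    have hrange : List.range' (cs.length - walk - (r + 1)) (r + 1) =
        (cs.length - walk - (r + 1)) :: List.range' (cs.length - walk - r) r := by
      rw [List.range'_succ,
        show cs.length - walk - (r + 1) + 1 = cs.length - walk - r from by omega]
    rw [hrange]
    simp only [pscLoopA, List.all_cons, List.map_cons]
    by_cases hmatch : cs.getD (cs.length - walk - (r + 1)) ' ' =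
        cs.getD (walk + (cs.length - walk - (r + 1))) ' '
    · rw [if_neg (not_not_intro hmatch)]
      rcases Nat.eq_zero_or_pos r with hr0 | hrpos
      · subst hr0
        have he : cs.length - walk - (0 + 1) = cs.length - walk - 1 := by omega
        rw [if_pos he]
        simp only [List.range'_zero, List.all_nil, Bool.and_true, List.map_nil, pscLoopA]
        rw [if_pos (by simpa using hmatch)]
      · have hne : cs.length - walk - (r + 1) = cs.length - walk - 1 → False := by
          intro hc
          omega
        rw [if_neg hne]
        rw [ih hrpos (by omega) (temp ++ [cs.getD (cs.length - walk - (r + 1)) ' ']) acc]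
        by_cases hall : (List.range' (cs.length - walk - r) r).all
            (fun i => cs.getD i ' ' == cs.getD (walk + i) ' ') = true
        · rw [if_pos hall,
            if_pos (by rw [Bool.and_eq_true]; exact ⟨beq_iff_eq.mpr hmatch, hall⟩),
            List.append_assoc]
          rfl
        · rw [if_neg hall,
            if_neg (by rw [Bool.and_eq_true]; rintro ⟨-, h2⟩; exact hall h2)]
    · rw [if_pos hmatch,
        if_neg (by rw [Bool.and_eq_true, beq_iff_eq]; rintro ⟨h1, -⟩; exact hmatch h1)]

theorem pscLoopA_border (cs : List Char) (walk : Nat) (hw1 : 1 ≤ walk) (hw2 : walk ≤ cs.length - 1)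
    (acc : List String) :
    pscLoopA cs walk [] acc (List.range (cs.length - walk)) =
      if borderB cs (cs.length - walk) then acc ++ [fOut cs (cs.length - walk)] else acc := by
  have hm1 : 1 ≤ cs.length - walk := by omega
  have h := pscLoopA_spec cs walk hw1 hw2 (cs.length - walk) hm1 le_rfl [] acc
  rw [Nat.sub_self] at h
  rw [List.range_eq_range', h]
  have hall : ((List.range' 0 (cs.length - walk)).all
      (fun i => cs.getD i ' ' == cs.getD (walk + i) ' ')) = borderB cs (cs.length - walk) := by
    rw [Bool.eq_iff_iff, List.all_eq_true, borderB_iff cs walk hw1 (by omega)]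
    constructor
    · intro h' i hi
      have := h' i (by simp [List.mem_range']; omega)
      simpa using this
    · intro h' i hi
      simp only [List.mem_range', Nat.zero_add] at hi
      obtain ⟨h2', h3'⟩ := hi
      simpa using h' i (by omega)
  rw [hall]
  split
  · rw [List.nil_append, ← List.range_eq_range',
      take_eq_map_range cs (cs.length - walk) (by omega)]
    rfl
  · rfl

theorem pscOuterA_spec (cs : List Char) :
    ∀ w, w ≤ cs.length - 1 → ∀ acc,
      pscOuterA cs acc w =
        acc ++ ((List.range' (cs.length - w) w).filter (fun k => borderB cs k)).map (fOut cs) := by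
  intro w
  induction w with
  | zero => intro _ acc; simp [pscOuterA]
  | succ w ih =>
    intro hw acc
    simp only [pscOuterA]
    rw [pscLoopA_border cs (w + 1) (by omega) (by omega) acc]
    rw [ih (by omega)]
    have hrange : List.range' (cs.length - (w + 1)) (w + 1) =
        (cs.length - (w + 1)) :: List.range' (cs.length - w) w := by
      rw [List.range'_succ,
        show cs.length - (w + 1) + 1 = cs.length - w from by omega]
    rw [hrange, List.filter_cons]
    by_cases hb : borderB cs (cs.length - (w + 1)) = true
    · rw [if_pos hb, if_pos (by simp [hb])]
      simp [List.append_assoc]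
    · rw [if_neg hb, if_neg (by simp [hb])]

theorem A_eq_gOut (cs : List Char) :
    pscOuterA cs [] (cs.length - 1) = gOut cs (cs.length - 1) := by
  rcases Nat.eq_zero_or_pos cs.length with h0 | hpos
  · rw [h0]; simp [pscOuterA, gOut]
  · rw [pscOuterA_spec cs (cs.length - 1) le_rfl []]
    have h1 : cs.length - (cs.length - 1) = 1 := by omega
    rw [h1]
    simp [gOut]

-- longestBorder facts
theorem lbGo_border (cs : List Char) (k : Nat) : borderB cs (lbGo cs k) = true := by
  induction k with
  | zero => simp [lbGo, borderB]
  | succ l ih =>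
    simp only [lbGo]
    split
    · next h => simpa [borderB] using h
    · exact ih

theorem lbGo_max (cs : List Char) (k l : Nat) (hb : borderB cs l = true) (hl : l ≤ k) :
    l ≤ lbGo cs k := by
  induction k with
  | zero => omega
  | succ m ih =>
    simp only [lbGo]
    split
    · omega
    · next h =>
      rcases Nat.lt_or_ge l (m + 1) with hlt | hge
      · exact ih (by omega)
      · exfalso
        have he : l = m + 1 := by omega
        subst he
        exact h (by simpa [borderB] using hb)

-- key border-theory fact: borders of a border are borders of the whole string
theorem border_take (cs : List Char) (b k : Nat) (hb : borderB cs b = true)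
    (hbn : b ≤ cs.length) (hk : k ≤ b) :
    borderB (cs.take b) k = borderB cs k := by
  have hbeq : cs.take b = cs.drop (cs.length - b) := by
    simpa [borderB, beq_iff_eq] using hb
  unfold borderB
  have hlen : (cs.take b).length = b := by simp [List.length_take]; omega
  rw [hlen]
  have h1 : (cs.take b).take k = cs.take k := by
    rw [List.take_take]; congr 1; omega
  have h2 : (cs.take b).drop (b - k) = cs.drop (cs.length - k) := by
    rw [hbeq, List.drop_drop]
    congr 1
    omega
  rw [h1, h2]

theorem range'_one_concat (b : Nat) (hb : 1 ≤ b) :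
    List.range' 1 b = List.range' 1 (b - 1) ++ [b] := by
  have h := List.range'_concat (s := 1) (n := b - 1) (step := 1)
  have h1 : b - 1 + 1 = b := by omega
  have h2 : 1 + 1 * (b - 1) = b := by omega
  rw [h1, h2] at h
  exact h

-- restricting the filter range when all satisfying elements are ≤ j
theorem filter_range'_restrict (p : Nat → Bool) (j m : Nat) (hjm : j ≤ m)
    (hb : ∀ k, p k = true → 1 ≤ k → k ≤ m → k ≤ j) :
    (List.range' 1 m).filter p = (List.range' 1 j).filter p := by
  induction m with
  | zero =>
    have hj : j = 0 := by omega
    subst hj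
    rfl
  | succ m ih =>
    rcases Nat.eq_or_lt_of_le hjm with he | hlt
    · subst he; rfl
    · have h1 : List.range' 1 (m + 1) = List.range' 1 m ++ [m + 1] := by
        simpa using range'_one_concat (m + 1) (by omega)
      rw [h1, List.filter_append]
      have hp : ¬ p (m + 1) = true := by
        intro hc
        have := hb (m + 1) hc (by omega) (by omega)
        omega
      have h2 : List.filter p [m + 1] = [] := by
        simp [List.filter, hp]
      rw [h2, List.append_nil]
      exact ih (by omega) (fun k hk hk1 hk2 => hb k hk hk1 (by omega))

theorem pscChainB_spec (cs : List Char) :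
    ∀ b, borderB cs b = true → b ≤ cs.length → ∀ out,
      pscChainB cs b out = out ++ (gOut cs b).reverse := by
  intro b
  induction b using Nat.strong_induction_on with
  | _ b ih =>
    intro hb hbn out
    rcases Nat.eq_zero_or_pos b with h0 | hpos
    · subst h0
      rw [pscChainB]
      simp [gOut]
    · rw [pscChainB, if_neg (by omega)]
      have hlenb : (cs.take b).length = b := by simp [List.length_take]; omega
      have hb'le : longestBorder (cs.take b) ≤ b - 1 := by
        have := lbGo_le (cs.take b) ((cs.take b).length - 1)
        simpa [longestBorder, hlenb] using this
      have hb'border : borderB cs (longestBorder (cs.take b)) = true := by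
        have := lbGo_border (cs.take b) ((cs.take b).length - 1)
        rw [← border_take cs b (longestBorder (cs.take b)) hb hbn (by omega)]
        simpa [longestBorder] using this
      rw [ih (longestBorder (cs.take b)) (by omega) hb'border (by omega)
        (out ++ [String.ofList (cs.take b)])]
      have hgb : gOut cs b = gOut cs (longestBorder (cs.take b)) ++ [fOut cs b] := by
        unfold gOut
        rw [range'_one_concat b (by omega), List.filter_append]
        have hfb : List.filter (fun k => borderB cs k) [b] = [b] := by
          simp [List.filter, hb]
        rw [hfb]
        have hrestrict : (List.range' 1 (b - 1)).filter (fun k => borderB cs k) =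
            (List.range' 1 (longestBorder (cs.take b))).filter (fun k => borderB cs k) := by
          apply filter_range'_restrict _ _ _ hb'le
          intro k hk hk1 hkb
          have hkb' : borderB (cs.take b) k = true := by
            rw [border_take cs b k hb hbn (by omega)]; exact hk
          have := lbGo_max (cs.take b) ((cs.take b).length - 1) k hkb' (by omega)
          simpa [longestBorder] using this
        rw [hrestrict, List.map_append]
        rfl
      rw [hgb, List.reverse_append]
      simp [fOut]

theorem B_eq_gOut (cs : List Char) :
    (pscChainB cs (longestBorder cs) []).reverse = gOut cs (cs.length - 1) := by
  have hb0 : borderB cs (longestBorder cs) = true := lbGo_border cs (cs.length - 1)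
  have hle : longestBorder cs ≤ cs.length - 1 := lbGo_le cs (cs.length - 1)
  rw [pscChainB_spec cs (longestBorder cs) hb0 (by omega) []]
  rw [List.nil_append, List.reverse_reverse]
  unfold gOut
  congr 1
  symm
  apply filter_range'_restrict _ _ _ hle
  intro k hk hk1 hkm
  exact lbGo_max cs (cs.length - 1) k hk (by omega)

-- ===== VERDICT (by name: the statement is the Claim_ definition above) =====
theorem prefix_suffix_compare_spec : Claim_equal_prefix_suffix_compare := by
  intro X _
  unfold Spec_prefix_suffix_compare prefix_suffix_compare prefix_suffix_compare_alt
  rw [A_eq_gOut, B_eq_gOut]
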